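-- pv_equiv track=rewrite | github.com/TimHung000/leetcode | 2017_gridGame/main.py | gridGame
-- ===== SOURCE A (Python) =====
-- from typing import List
--
-- def gridGame(grid: List[List[int]]) -> int:
--     N = len(grid[0])
--     prefixSum1 = [val for val in grid[0]]
--     prefixSum2 = [val for val in grid[1]]
--
--     for i in range(1, N):
--         prefixSum1[i] += prefixSum1[i-1]
--         prefixSum2[i] += prefixSum2[i-1]
--
--     res = float("inf")
--     for i in range(N):
--         row1 = prefixSum1[-1] - prefixSum1[i]
--         row2 = prefixSum2[i-1] if i > 0 else 0
--         robot2PathSum = max(row1, row2)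
--         res = min(res, robot2PathSum)
--
--     return res
-- ===== SOURCE B (Python) =====
-- def gridGame(grid):
--     # Divide and conquer over split positions (instead of prefix-sum arrays + linear scan).
--     top = grid[0]
--     bot = grid[1][:len(top)]
--
--     def solve(t, b, left_bot, right_top):
--         # min over splits i in this segment of
--         #   max(right_top + sum of t strictly right of i, left_bot + sum of b strictly left of i)
--         if len(t) == 1:
--             return max(right_top, left_bot)
--         m = len(t) // 2
--         return min(solve(t[:m], b[:m], left_bot, right_top + sum(t[m:])),
--                    solve(t[m:], b[m:], left_bot + sum(b[:m]), right_top))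
--
--     return solve(top, bot, 0, 0)
-- ===== Notes on version B (the rewrite author's own statement) =====
-- stated objective: alternative
-- what changed: Replaces the prefix-sum arrays and linear scan over split points by a divide-and-conquer recursion that halves the split range, carrying the bottom-left and top-right sums outside the current segment as two offset parameters.
-- outside the precondition, e.g. on gridGame([[], []]): A returns inf, B raises RecursionError; on gridGame([[5], []]): A returns 0, B returns 0
import Mathlib
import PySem

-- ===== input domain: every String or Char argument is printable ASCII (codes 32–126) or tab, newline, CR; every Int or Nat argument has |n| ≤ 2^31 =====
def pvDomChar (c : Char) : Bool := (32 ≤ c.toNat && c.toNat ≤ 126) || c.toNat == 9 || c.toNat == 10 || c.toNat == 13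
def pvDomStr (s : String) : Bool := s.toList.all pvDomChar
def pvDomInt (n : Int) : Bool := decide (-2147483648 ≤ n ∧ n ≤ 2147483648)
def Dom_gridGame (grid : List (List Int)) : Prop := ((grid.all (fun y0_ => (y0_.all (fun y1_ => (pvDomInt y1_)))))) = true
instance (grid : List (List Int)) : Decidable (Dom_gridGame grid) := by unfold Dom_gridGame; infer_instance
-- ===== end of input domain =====

-- B replaces A's prefix-sum arrays + linear scan by a divide-and-conquer recursion over the
-- split range carrying two outside-segment sums as offsets (objective: alternative).

-- ===== PORT A =====
-- grid[0] / grid[1]: Pre_ guarantees at least two rows, so getD is exact there.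
def gridGame (grid : List (List Int)) : Int :=
  let row0 := grid.getD 0 []
  let row1 := grid.getD 1 []
  let N : Nat := row0.length
  -- for i in range(1, N): prefixSum1[i] += prefixSum1[i-1]; prefixSum2[i] += prefixSum2[i-1]
  let ps := (PySem.List.pyRange 1 (N : Int) 1).foldl
    (fun (st : List Int × List Int) (i : Int) =>
      (PySem.List.pySetD st.1 i (PySem.List.pyGetD st.1 i 0 + PySem.List.pyGetD st.1 (i - 1) 0),
       PySem.List.pySetD st.2 i (PySem.List.pyGetD st.2 i 0 + PySem.List.pyGetD st.2 (i - 1) 0)))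
    (row0, row1)
  -- res = float('inf') is ported as `none`; Pre_ forces at least one loop iteration
  let res := (PySem.List.pyRange 0 (N : Int) 1).foldl
    (fun (res : Option Int) (i : Int) =>
      let r1 := PySem.List.pyGetD ps.1 (-1) 0 - PySem.List.pyGetD ps.1 i 0
      let r2 := if 0 < i then PySem.List.pyGetD ps.2 (i - 1) 0 else 0
      let cand := max r1 r2
      some (match res with | none => cand | some r => min r cand))
    none
  res.getD 0

-- ===== PORT B =====
-- solve(t, b, left_bot, right_top): the `t.length ≤ 1` guard is Python's `len(t) == 1` base
-- case made total, and `fuel` (segment lengths strictly decrease, so `t.length` is enough)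
-- is a pure totality guard (Python never reaches an empty segment; on it Python would not
-- return, and with enough fuel the guard never fires).
def solveB (fuel : Nat) (t b : List Int) (leftBot rightTop : Int) : Int :=
  match fuel with
  | 0 => max rightTop leftBot
  | fuel + 1 =>
    if t.length ≤ 1 then max rightTop leftBot
    else
      let m := t.length / 2
      min (solveB fuel (t.take m) (b.take m) leftBot (rightTop + (t.drop m).sum))
          (solveB fuel (t.drop m) (b.drop m) (leftBot + (b.take m).sum) rightTop)

def gridGame_alt (grid : List (List Int)) : Int :=
  let top := grid.getD 0 []
  let bot := (grid.getD 1 []).take top.length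
  solveB top.length top bot 0 0

-- ===== PRECONDITION & SPEC =====
-- Pre_ is the natural 2×N problem shape: at least two rows, row 0 nonempty, row 1 at least
-- as long as row 0. Excluded inputs A still returns on: an empty row 0 (A returns float('inf'),
-- not an int) and a ragged grid with len(row0)==1 > len(row1) (outside the natural 2×N domain;
-- there both programs happen to return 0); on all other excluded shapes A raises IndexError.
def Pre_gridGame (grid : List (List Int)) : Prop :=
  2 ≤ grid.length ∧ grid.getD 0 [] ≠ [] ∧ (grid.getD 0 []).length ≤ (grid.getD 1 []).length
instance (grid : List (List Int)) : Decidable (Pre_gridGame grid) := by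
  unfold Pre_gridGame; infer_instance
def pvWitness_gridGame : List (List Int) := [[2, 5, 4], [1, 5, 1]]

def Spec_gridGame (grid : List (List Int)) (out : Int) : Prop := out = gridGame_alt grid
instance (grid : List (List Int)) (out : Int) : Decidable (Spec_gridGame grid out) := by
  unfold Spec_gridGame; infer_instance

-- ===== CLAIM (what is proved, stated in full; the proofs are below) =====
def Claim_equal_gridGame : Prop :=
  ∀ (grid : List (List Int)), Dom_gridGame grid → Pre_gridGame grid →
    Spec_gridGame grid (gridGame grid)

-- ===== LEMMAS AND PROOFS =====

-- running minimum over an Option Int accumulator (`none` = float('inf'))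
def mmin (acc : Option Int) (x : Int) : Option Int :=
  some (match acc with | none => x | some r => min r x)

-- the list of prefix sums of l
def pref (l : List Int) : List Int :=
  (List.range l.length).map (fun j => (l.take (j + 1)).sum)

-- the value both programs minimise over at split index j
def splitCost (row0 row1 : List Int) (j : Nat) : Int :=
  max (row0.sum - (row0.take (j + 1)).sum) ((row1.take j).sum)

-- A's in-place prefix-sum update at index i
def updA (l : List Int) (i : Int) : List Int :=
  PySem.List.pySetD l i (PySem.List.pyGetD l i 0 + PySem.List.pyGetD l (i - 1) 0)

-- minimum of a nonempty list (0 on [])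
def smin : List Int → Int
  | [] => 0
  | x :: xs => xs.foldl min x

-- the candidate list B's divide-and-conquer minimises over
def cands (t b : List Int) (lB rT : Int) : List Int :=
  (List.range t.length).map (fun i => max (rT + (t.drop (i + 1)).sum) (lB + (b.take i).sum))

lemma length_pref (l : List Int) : (pref l).length = l.length := by
  simp [pref]

lemma pref_getElem (l : List Int) (j : Nat) (h : j < l.length) :
    (pref l)[j]'(by simpa [length_pref]) = (l.take (j + 1)).sum := by
  simp [pref]

lemma pref_take_succ (l : List Int) (n : Nat) (h : n < l.length) :
    pref (l.take (n + 1)) = pref (l.take n) ++ [(l.take (n + 1)).sum] := by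
  have hl1 : (l.take (n + 1)).length = n + 1 := by simp; omega
  have hl0 : (l.take n).length = n := by simp; omega
  simp only [pref, hl1, hl0, List.range_succ, List.map_append, List.map_cons, List.map_nil]
  congr 1
  · apply List.map_congr_left
    intro j hj
    rw [List.mem_range] at hj
    rw [List.take_take, List.take_take, min_eq_left (by omega), min_eq_left (by omega)]
  · rw [List.take_take, min_self]

lemma fold_updA (r : List Int) (n : Nat) (h1 : 1 ≤ n) (h2 : n ≤ r.length) :
    (PySem.List.pyRange 1 (n : Int) 1).foldl updA r = pref (r.take n) ++ r.drop n := by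
  induction n, h1 using Nat.le_induction with
  | base =>
    rw [PySem.List.pyRange_one_eq_nil (by norm_num), List.foldl_nil]
    cases r with
    | nil => simp at h2
    | cons a t => simp [pref]
  | succ n hn ih =>
    have hnr : n < r.length := by omega
    rw [show ((n + 1 : Nat) : Int) = (n : Int) + 1 by push_cast; ring,
        PySem.List.pyRange_one_succ_right (by exact_mod_cast hn), List.foldl_append,
        List.foldl_cons, List.foldl_nil, ih (by omega)]
    have hplen : (pref (r.take n)).length = n := by
      rw [length_pref]; simp; omega
    have hXlen : (pref (r.take n) ++ r.drop n).length = r.length := by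
      simp [hplen]; omega
    unfold updA
    rw [PySem.List.pySetD_natCast, PySem.List.pyGetD_natCast,
        show ((n : Int) - 1) = ((n - 1 : Nat) : Int) by omega, PySem.List.pyGetD_natCast]
    have hgn : (pref (r.take n) ++ r.drop n).getD n 0 = r[n] := by
      rw [List.getD, List.getElem?_append_right (by omega), hplen, Nat.sub_self,
          List.getElem?_drop, Nat.add_zero, List.getElem?_eq_getElem hnr, Option.getD_some]
    have hgn1 : (pref (r.take n) ++ r.drop n).getD (n - 1) 0 = (r.take n).sum := by
      rw [List.getD, List.getElem?_append_left (by omega),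
          List.getElem?_eq_getElem (by omega), Option.getD_some, pref_getElem]
      · rw [Nat.sub_add_cancel hn, List.take_take, min_self]
      · simp; omega
    rw [hgn, hgn1]
    rw [List.set_append_right _ _ (by omega), hplen, Nat.sub_self]
    rw [List.drop_eq_getElem_cons hnr, List.set_cons_zero]
    rw [pref_take_succ r n hnr, List.append_assoc, List.singleton_append]
    congr 2
    rw [List.take_add_one, List.sum_append, List.getElem?_eq_getElem hnr]
    simp [Int.add_comm]

lemma a_eq_fold (grid : List (List Int)) (hp : Pre_gridGame grid) :
    gridGame grid =
      ((List.range (grid.getD 0 []).length).foldl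
        (fun a j => mmin a (splitCost (grid.getD 0 []) (grid.getD 1 []) j)) none).getD 0 := by
  obtain ⟨h2, h0, hlen⟩ := hp
  have hN : 1 ≤ (grid.getD 0 []).length := List.length_pos_of_ne_nil h0
  simp only [gridGame]
  rw [show (fun (st : List Int × List Int) (i : Int) =>
        (PySem.List.pySetD st.1 i (PySem.List.pyGetD st.1 i 0 + PySem.List.pyGetD st.1 (i - 1) 0),
         PySem.List.pySetD st.2 i (PySem.List.pyGetD st.2 i 0 + PySem.List.pyGetD st.2 (i - 1) 0)))
      = (fun (st : List Int × List Int) (i : Int) => (updA st.1 i, updA st.2 i)) from rfl,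
      PySem.List.foldl_prod_mk, fold_updA _ _ hN le_rfl, fold_updA _ _ hN hlen,
      List.take_length, List.drop_length, List.append_nil]
  have hne : pref (grid.getD 0 []) ≠ [] := by
    intro h
    have := length_pref (grid.getD 0 [])
    rw [h] at this
    exact h0 (List.length_eq_zero_iff.mp this.symm)
  have hlast : PySem.List.pyGetD (pref (grid.getD 0 [])) (-1) 0 = (grid.getD 0 []).sum := by
    rw [PySem.List.pyGetD_neg_one _ _ hne]
    simp only [List.getLast_eq_getElem, length_pref]
    rw [pref_getElem _ _ (by omega), Nat.sub_add_cancel hN, List.take_length]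
  rw [show (fun (res : Option Int) (i : Int) =>
        some
          (match res with
          | none =>
            max (PySem.List.pyGetD (pref (grid.getD 0 []), pref (List.take (grid.getD 0 []).length (grid.getD 1 [])) ++ List.drop (grid.getD 0 []).length (grid.getD 1 [])).1 (-1) 0
                - PySem.List.pyGetD (pref (grid.getD 0 []), pref (List.take (grid.getD 0 []).length (grid.getD 1 [])) ++ List.drop (grid.getD 0 []).length (grid.getD 1 [])).1 i 0)
              (if 0 < i then PySem.List.pyGetD (pref (grid.getD 0 []), pref (List.take (grid.getD 0 []).length (grid.getD 1 [])) ++ List.drop (grid.getD 0 []).length (grid.getD 1 [])).2 (i - 1) 0 else 0)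
          | some r =>
            min r
              (max (PySem.List.pyGetD (pref (grid.getD 0 []), pref (List.take (grid.getD 0 []).length (grid.getD 1 [])) ++ List.drop (grid.getD 0 []).length (grid.getD 1 [])).1 (-1) 0
                  - PySem.List.pyGetD (pref (grid.getD 0 []), pref (List.take (grid.getD 0 []).length (grid.getD 1 [])) ++ List.drop (grid.getD 0 []).length (grid.getD 1 [])).1 i 0)
                (if 0 < i then PySem.List.pyGetD (pref (grid.getD 0 []), pref (List.take (grid.getD 0 []).length (grid.getD 1 [])) ++ List.drop (grid.getD 0 []).length (grid.getD 1 [])).2 (i - 1) 0 else 0))))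
      = (fun (res : Option Int) (i : Int) =>
          mmin res (max (PySem.List.pyGetD (pref (grid.getD 0 [])) (-1) 0
              - PySem.List.pyGetD (pref (grid.getD 0 [])) i 0)
            (if 0 < i then PySem.List.pyGetD (pref (List.take (grid.getD 0 []).length (grid.getD 1 [])) ++ List.drop (grid.getD 0 []).length (grid.getD 1 [])) (i - 1) 0 else 0)))
      from rfl]
  rw [PySem.List.pyRange_zero_natCast, List.foldl_map]
  congr 1
  apply PySem.List.foldl_congr_mem'
  intro j hj acc
  rw [List.mem_range] at hj
  rw [hlast]
  congr 1
  unfold splitCost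
  congr 1
  · rw [PySem.List.pyGetD_natCast,
        List.getD_eq_getElem (pref (grid.getD 0 [])) 0 (n := j) (hn := by rw [length_pref]; omega),
        pref_getElem _ _ hj]
  · rcases Nat.eq_zero_or_pos j with hz | hpos
    · subst hz; simp
    · rw [if_pos (by exact_mod_cast hpos),
          show ((j : Int) - 1) = ((j - 1 : Nat) : Int) by omega,
          PySem.List.pyGetD_natCast,
          List.getD_eq_getElem
            (pref (List.take (grid.getD 0 []).length (grid.getD 1 [])) ++
              List.drop (grid.getD 0 []).length (grid.getD 1 [])) 0 (n := j - 1) (hn := by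
            rw [List.length_append, length_pref, List.length_take, List.length_drop]
            omega),
          List.getElem_append_left (by rw [length_pref, List.length_take]; omega),
          pref_getElem _ _ (by rw [List.length_take]; omega),
          List.take_take, Nat.sub_add_cancel hpos, min_eq_left (by omega)]

lemma foldl_min_min (l : List Int) : ∀ a b : Int, l.foldl min (min a b) = min a (l.foldl min b) := by
  induction l with
  | nil => intro a b; rfl
  | cons c t ih =>
    intro a b
    simp only [List.foldl_cons, min_assoc, ih]

lemma smin_append (xs ys : List Int) (hx : xs ≠ []) (hy : ys ≠ []) :
    smin (xs ++ ys) = min (smin xs) (smin ys) := by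
  cases xs with
  | nil => exact absurd rfl hx
  | cons x xs' =>
    cases ys with
    | nil => exact absurd rfl hy
    | cons y ys' =>
      simp only [smin, List.cons_append, List.foldl_append, List.foldl_cons]
      rw [foldl_min_min]

lemma foldl_mmin_some (l : List Int) : ∀ a : Int, l.foldl mmin (some a) = some (l.foldl min a) := by
  induction l with
  | nil => intro a; rfl
  | cons x xs ih => intro a; simp only [List.foldl_cons, mmin, ih]

lemma foldl_mmin_smin (l : List Int) (hl : l ≠ []) :
    (l.foldl mmin none).getD 0 = smin l := by
  cases l with
  | nil => exact absurd rfl hl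
  | cons x xs =>
    simp only [List.foldl_cons, smin]
    rw [show mmin none x = some x from rfl, foldl_mmin_some, Option.getD_some]

lemma cands_length (t b : List Int) (lB rT : Int) : (cands t b lB rT).length = t.length := by
  simp [cands]

lemma cands_ne_nil (t b : List Int) (lB rT : Int) (ht : t ≠ []) : cands t b lB rT ≠ [] := by
  intro h
  have := cands_length t b lB rT
  rw [h] at this
  exact ht (List.length_eq_zero_iff.mp this.symm)

lemma cands_split (t b : List Int) (lB rT : Int) (m : Nat) (hm : m ≤ t.length)
    (hb : b.length = t.length) :
    cands t b lB rT
      = cands (t.take m) (b.take m) lB (rT + (t.drop m).sum)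
        ++ cands (t.drop m) (b.drop m) (lB + (b.take m).sum) rT := by
  unfold cands
  rw [List.length_take, List.length_drop, min_eq_left hm]
  conv_lhs => rw [show t.length = m + (t.length - m) by omega, List.range_add]
  rw [List.map_append, List.map_map]
  congr 1
  · apply List.map_congr_left
    intro i hi
    rw [List.mem_range] at hi
    congr 1
    · -- top side, i < m
      have hsplit : (t.drop (i + 1)) =
          ((t.drop (i + 1)).take (m - (i + 1))) ++ ((t.drop (i + 1)).drop (m - (i + 1))) :=
        (List.take_append_drop _ _).symm
      rw [List.drop_take]
      conv_lhs => rw [hsplit]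
      rw [List.sum_append, List.drop_drop, show i + 1 + (m - (i + 1)) = m by omega]
      ring
    · rw [List.take_take, min_eq_left (by omega)]
  · apply List.map_congr_left
    intro j hj
    rw [List.mem_range] at hj
    simp only [Function.comp]
    congr 1
    · rw [List.drop_drop, show m + (j + 1) = m + j + 1 by omega]
    · rw [show m + j = m + j from rfl, List.take_add, List.sum_append]
      ring

lemma solveB_eq (fuel : Nat) : ∀ (t b : List Int) (lB rT : Int),
    t.length ≤ fuel → 1 ≤ t.length → b.length = t.length →
    solveB fuel t b lB rT = smin (cands t b lB rT) := by
  induction fuel with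
  | zero => intro t b lB rT ht h1 hb; omega
  | succ fuel ih =>
    intro t b lB rT ht h1 hb
    rw [solveB]
    by_cases hle : t.length ≤ 1
    · rw [if_pos hle]
      obtain ⟨a, rfl⟩ := List.length_eq_one_iff.mp (show t.length = 1 by omega)
      simp [cands, smin]
    · rw [if_neg hle]
      have h2 : 2 ≤ t.length := by omega
      have hm1 : 1 ≤ t.length / 2 := by omega
      have hm2 : t.length / 2 < t.length := by omega
      have hbt : b.length = t.length := hb
      have htk : t.take (t.length / 2) ≠ [] := by
        intro h; have h' := congrArg List.length h
        simp only [List.length_take, List.length_nil] at h'; omega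
      have htd : t.drop (t.length / 2) ≠ [] := by
        intro h; have h' := congrArg List.length h
        simp only [List.length_drop, List.length_nil] at h'; omega
      rw [cands_split t b lB rT (t.length / 2) (by omega) hbt,
          smin_append
            (cands (t.take (t.length / 2)) (b.take (t.length / 2)) lB
              (rT + (t.drop (t.length / 2)).sum))
            (cands (t.drop (t.length / 2)) (b.drop (t.length / 2))
              (lB + (b.take (t.length / 2)).sum) rT)
            (cands_ne_nil _ _ _ _ htk) (cands_ne_nil _ _ _ _ htd)]
      exact congrArg₂ min
        (ih (t.take (t.length / 2)) (b.take (t.length / 2)) lB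
          (rT + (t.drop (t.length / 2)).sum)
          (by rw [List.length_take]; omega) (by rw [List.length_take]; omega)
          (by rw [List.length_take, List.length_take]; omega))
        (ih (t.drop (t.length / 2)) (b.drop (t.length / 2))
          (lB + (b.take (t.length / 2)).sum) rT
          (by rw [List.length_drop]; omega) (by rw [List.length_drop]; omega)
          (by rw [List.length_drop, List.length_drop]; omega))

lemma b_eq_smin (grid : List (List Int)) (hp : Pre_gridGame grid) :
    gridGame_alt grid =
      smin ((List.range (grid.getD 0 []).length).map
        (fun j => splitCost (grid.getD 0 []) (grid.getD 1 []) j)) := by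
  obtain ⟨h2, h0, hlen⟩ := hp
  have hN : 1 ≤ (grid.getD 0 []).length := List.length_pos_of_ne_nil h0
  simp only [gridGame_alt]
  rw [solveB_eq (grid.getD 0 []).length _ _ _ _ le_rfl hN
      (by rw [List.length_take]; omega)]
  congr 1
  unfold cands
  apply List.map_congr_left
  intro i hi
  rw [List.mem_range] at hi
  unfold splitCost
  congr 1
  · rw [zero_add]
    have hsum : (grid.getD 0 []).sum
        = ((grid.getD 0 []).take (i + 1)).sum + ((grid.getD 0 []).drop (i + 1)).sum := by
      conv_lhs => rw [← List.take_append_drop (i + 1) (grid.getD 0 [])]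
      rw [List.sum_append]
    omega
  · rw [zero_add, List.take_take, min_eq_left (by omega)]

-- ===== VERDICT (by name: the statement is the Claim_ definition above) =====
theorem gridGame_spec : Claim_equal_gridGame := by
  intro grid _ hp
  unfold Spec_gridGame
  have h0 := hp.2.1
  rw [a_eq_fold grid hp, b_eq_smin grid hp,
    ← foldl_mmin_smin _ (by
      intro h; have := congrArg List.length h
      simp only [List.length_map, List.length_range, List.length_nil] at this
      exact h0 (List.length_eq_zero_iff.mp this)), List.foldl_map]
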